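-- pv_equiv track=rewrite | github.com/GundalaNikhil/DSA | dsa-problems/verify_sorting_testcases_all_backup.py | min_inversions_one_swap
-- ===== SOURCE A (Python) =====
-- def min_inversions_one_swap(arr):
--     """Find minimum inversions after one swap."""
--     n = len(arr)
--
--     def count_inversions(a):
--         inv = 0
--         for i in range(len(a)):
--             for j in range(i + 1, len(a)):
--                 if a[i] > a[j]:
--                     inv += 1
--         return inv
--
--     min_inv = count_inversions(arr)
--     for i in range(n):
--         for j in range(i + 1, n):
--             arr[i], arr[j] = arr[j], arr[i]
--             inv = count_inversions(arr)
--             min_inv = min(min_inv, inv)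
--             arr[i], arr[j] = arr[j], arr[i]
--     return min_inv
-- ===== SOURCE B (Python) =====
-- def min_inversions_one_swap(arr):
--     """Find minimum inversions after one swap."""
--     n = len(arr)
--     base = 0
--     for j in range(n):
--         for i in range(j):
--             if arr[i] > arr[j]:
--                 base += 1
--     best = base
--     for i in range(n):
--         for j in range(i + 1, n):
--             delta = (1 if arr[j] > arr[i] else 0) - (1 if arr[i] > arr[j] else 0)
--             for k in range(i + 1, j):
--                 delta += (1 if arr[j] > arr[k] else 0) - (1 if arr[i] > arr[k] else 0)
--                 delta += (1 if arr[k] > arr[i] else 0) - (1 if arr[k] > arr[j] else 0)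
--             best = min(best, base + delta)
--     return best
-- ===== Notes on version B (the rewrite author's own statement) =====
-- stated objective: faster
-- what changed: Counts base inversions once, then evaluates each candidate swap (i,j) by an O(j-i) incremental inversion delta over the affected positions instead of recounting all inversions of the swapped array.
import Mathlib
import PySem

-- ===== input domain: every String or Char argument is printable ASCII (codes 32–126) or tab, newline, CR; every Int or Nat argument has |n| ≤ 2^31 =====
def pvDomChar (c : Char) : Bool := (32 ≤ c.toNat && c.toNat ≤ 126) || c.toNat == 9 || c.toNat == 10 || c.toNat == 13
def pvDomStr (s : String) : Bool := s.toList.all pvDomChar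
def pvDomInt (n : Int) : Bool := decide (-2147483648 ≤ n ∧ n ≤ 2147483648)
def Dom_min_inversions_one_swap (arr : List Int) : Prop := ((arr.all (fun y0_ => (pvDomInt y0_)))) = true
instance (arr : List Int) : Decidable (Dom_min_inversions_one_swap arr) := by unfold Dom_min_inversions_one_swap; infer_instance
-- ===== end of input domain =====

-- B replaces A's full inversion recount per candidate swap by an incremental delta over the
-- affected index range (objective: faster; A is O(n^4), B is O(n^3)).
-- A temporarily swaps elements of its argument but restores them; the net mutation is none,
-- and the equivalence proved here is about the return value.


-- ===== PORT A =====
-- count_inversions: the nested i < j double loop of A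
def pvCountInv (a : List Int) : Int :=
  (List.range a.length).foldl (fun inv i =>
    (List.range' (i+1) (a.length - (i+1))).foldl (fun inv j =>
      if a.getD i 0 > a.getD j 0 then inv + 1 else inv) inv) 0

-- A swaps arr[i],arr[j], recounts all inversions, takes the min, and swaps back;
-- the swap-count-unswap body is ported as counting on the doubly-set list.
def min_inversions_one_swap (arr : List Int) : Int :=
  (List.range arr.length).foldl (fun min_inv i =>
    (List.range' (i+1) (arr.length - (i+1))).foldl (fun min_inv j =>
      min min_inv (pvCountInv ((arr.set i (arr.getD j 0)).set j (arr.getD i 0)))) min_inv)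
    (pvCountInv arr)

-- ===== PORT B =====
def min_inversions_one_swap_alt (arr : List Int) : Int :=
  let n := arr.length
  let base := (List.range n).foldl (fun acc j =>
      (List.range j).foldl (fun acc i =>
        if arr.getD i 0 > arr.getD j 0 then acc + 1 else acc) acc) 0
  (List.range n).foldl (fun best i =>
    (List.range' (i+1) (n - (i+1))).foldl (fun best j =>
      let delta0 := (if arr.getD j 0 > arr.getD i 0 then (1:Int) else 0)
                  - (if arr.getD i 0 > arr.getD j 0 then (1:Int) else 0)
      let delta := (List.range' (i+1) (j - (i+1))).foldl (fun d k =>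
        d + ((if arr.getD j 0 > arr.getD k 0 then (1:Int) else 0)
              - (if arr.getD i 0 > arr.getD k 0 then (1:Int) else 0))
          + ((if arr.getD k 0 > arr.getD i 0 then (1:Int) else 0)
              - (if arr.getD k 0 > arr.getD j 0 then (1:Int) else 0))) delta0
      min best (base + delta)) best) base

-- ===== PRECONDITION & SPEC =====
def Spec_min_inversions_one_swap (arr : List Int) (out : Int) : Prop := out = min_inversions_one_swap_alt arr
instance (arr : List Int) (out : Int) : Decidable (Spec_min_inversions_one_swap arr out) := by unfold Spec_min_inversions_one_swap; infer_instance

-- ===== CLAIM (what is proved, stated in full; the proofs are below) =====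
def Claim_equal_min_inversions_one_swap : Prop := ∀ (arr : List Int), Dom_min_inversions_one_swap arr → Spec_min_inversions_one_swap arr (min_inversions_one_swap arr)

-- ===== LEMMAS AND PROOFS =====

-- 0/1 indicator
def pvI (b : Prop) [Decidable b] : Int := if b then 1 else 0

-- mathematical inversion count of f on indices < n, row (second index) outermost
def pvS (f : ℕ → Int) (n : ℕ) : Int :=
  ∑ q ∈ Finset.range n, ∑ p ∈ Finset.range q, pvI (f p > f q)

def pvSwapF (f : ℕ → Int) (i j : ℕ) : ℕ → Int :=
  fun p => if p = i then f j else if p = j then f i else f p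

def pvDelta (f : ℕ → Int) (i j : ℕ) : Int :=
  pvI (f j > f i) - pvI (f i > f j)
  + ∑ k ∈ Finset.Ico (i+1) j,
      (pvI (f j > f k) - pvI (f i > f k) + (pvI (f k > f i) - pvI (f k > f j)))

lemma pvListSumRange' (g : ℕ → Int) (s m : ℕ) :
    ((List.range' s m).map g).sum = ∑ k ∈ Finset.Ico s (s+m), g k := by
  induction m generalizing s with
  | zero => simp
  | succ m ih =>
      rw [List.range'_succ, List.map_cons, List.sum_cons, ih (s+1),
        show s + (m+1) = (s+1) + m by omega,
        Finset.sum_Ico_eq_sum_range (f := g) (m := s) (n := s+1+m),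
        Finset.sum_Ico_eq_sum_range]
      rw [show s+1+m - s = m+1 by omega, Finset.sum_range_succ', show s+1+m - (s+1) = m by omega]
      simp [add_comm]
      ring_nf
      refine Finset.sum_congr rfl fun k _ => ?_
      congr 1; omega

lemma pvSplit5 (h : ℕ → Int) {i j n : ℕ} (hij : i < j) (hjn : j < n) :
    ∑ q ∈ Finset.range n, h q
      = ∑ q ∈ Finset.range i, h q + h i + ∑ q ∈ Finset.Ico (i+1) j, h q + h j
        + ∑ q ∈ Finset.Ico (j+1) n, h q := by
  simp only [Finset.range_eq_Ico]
  rw [← Finset.sum_Ico_consecutive h (Nat.zero_le (i+1)) (show i+1 ≤ n by omega),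
      ← Finset.sum_Ico_consecutive h (Nat.zero_le i) (show i ≤ i+1 by omega),
      ← Finset.sum_Ico_consecutive h (show (i+1:ℕ) ≤ j+1 by omega) (show j+1 ≤ n by omega),
      ← Finset.sum_Ico_consecutive h (show (i+1:ℕ) ≤ j by omega) (show j ≤ j+1 by omega),
      Finset.sum_Ico_succ_top (by omega : i ≤ i), Finset.sum_Ico_succ_top (le_refl j)]
  simp only [Finset.Ico_self, Finset.sum_empty]
  ring

lemma pvSplit3 (h : ℕ → Int) {i j : ℕ} (hij : i < j) :
    ∑ q ∈ Finset.range j, h q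
      = ∑ q ∈ Finset.range i, h q + h i + ∑ q ∈ Finset.Ico (i+1) j, h q := by
  simp only [Finset.range_eq_Ico]
  rw [← Finset.sum_Ico_consecutive h (Nat.zero_le (i+1)) (show i+1 ≤ j by omega),
      ← Finset.sum_Ico_consecutive h (Nat.zero_le i) (show i ≤ i+1 by omega),
      Finset.sum_Ico_succ_top (by omega : i ≤ i)]
  simp only [Finset.Ico_self, Finset.sum_empty]
  ring

-- the core incremental identity: swapping positions i < j < n changes the
-- inversion count by exactly pvDelta f i j
lemma pvS_swap (f : ℕ → Int) {i j n : ℕ} (hij : i < j) (hjn : j < n) :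
    pvS (pvSwapF f i j) n = pvS f n + pvDelta f i j := by
  have hFi : pvSwapF f i j i = f j := by simp [pvSwapF]
  have hFj : pvSwapF f i j j = f i := by simp [pvSwapF, (show ¬ j = i by omega)]
  have hFo : ∀ p, p ≠ i → p ≠ j → pvSwapF f i j p = f p := fun p h1 h2 => by
    simp [pvSwapF, h1, h2]
  set F := pvSwapF f i j with hF
  -- rows before i and after j are unchanged
  have r1 : ∀ q ∈ Finset.range i,
      (∑ p ∈ Finset.range q, pvI (F p > F q)) = ∑ p ∈ Finset.range q, pvI (f p > f q) := by
    intro q hq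
    rw [Finset.mem_range] at hq
    refine Finset.sum_congr rfl fun p hp => ?_
    rw [Finset.mem_range] at hp
    rw [hFo p (by omega) (by omega), hFo q (by omega) (by omega)]
  have r5 : ∀ q ∈ Finset.Ico (j+1) n,
      (∑ p ∈ Finset.range q, pvI (F p > F q)) = ∑ p ∈ Finset.range q, pvI (f p > f q) := by
    intro q hq
    rw [Finset.mem_Ico] at hq
    have hFq : F q = f q := hFo q (by omega) (by omega)
    have hsub : ({i, j} : Finset ℕ) ⊆ Finset.range q := by
      intro x hx
      simp only [Finset.mem_insert, Finset.mem_singleton] at hx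
      rw [Finset.mem_range]; omega
    have hzero : ∀ x ∈ Finset.range q, x ∉ ({i, j} : Finset ℕ) →
        pvI (F x > F q) - pvI (f x > f q) = 0 := by
      intro x _ hx
      simp only [Finset.mem_insert, Finset.mem_singleton, not_or] at hx
      rw [hFo x hx.1 hx.2, hFq]; ring
    have hz : ∑ p ∈ Finset.range q, (pvI (F p > F q) - pvI (f p > f q)) = 0 := by
      rw [← Finset.sum_subset hsub hzero, Finset.sum_pair (show i ≠ j by omega),
        hFi, hFj, hFq]
      ring
    rw [Finset.sum_sub_distrib] at hz
    linarith
  -- rows strictly between i and j change by one pair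
  have r3 : ∀ q ∈ Finset.Ico (i+1) j,
      (∑ p ∈ Finset.range q, pvI (F p > F q))
        = ∑ p ∈ Finset.range q, pvI (f p > f q) + (pvI (f j > f q) - pvI (f i > f q)) := by
    intro q hq
    rw [Finset.mem_Ico] at hq
    have hFq : F q = f q := hFo q (by omega) (by omega)
    have hz : ∑ p ∈ Finset.range q, (pvI (F p > F q) - pvI (f p > f q))
        = pvI (f j > f q) - pvI (f i > f q) := by
      rw [Finset.sum_eq_single_of_mem i (Finset.mem_range.mpr (by omega))]
      · rw [hFi, hFq]
      · intro p hp hpi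
        rw [Finset.mem_range] at hp
        rw [hFo p hpi (by omega), hFq]; ring
    rw [Finset.sum_sub_distrib] at hz
    linarith
  -- row at i
  have r2 : (∑ p ∈ Finset.range i, pvI (F p > F i)) = ∑ p ∈ Finset.range i, pvI (f p > f j) := by
    refine Finset.sum_congr rfl fun p hp => ?_
    rw [Finset.mem_range] at hp
    rw [hFo p (by omega) (by omega), hFi]
  -- row at j, split at i, for both F and f
  have r4F : (∑ p ∈ Finset.range j, pvI (F p > F j))
      = ∑ p ∈ Finset.range i, pvI (f p > f i) + pvI (f j > f i)
        + ∑ p ∈ Finset.Ico (i+1) j, pvI (f p > f i) := by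
    rw [pvSplit3 (fun p => pvI (F p > F j)) hij, hFi, hFj]
    congr 1
    · congr 1
      refine Finset.sum_congr rfl fun p hp => ?_
      rw [Finset.mem_range] at hp
      rw [hFo p (by omega) (by omega)]
    · refine Finset.sum_congr rfl fun p hp => ?_
      rw [Finset.mem_Ico] at hp
      rw [hFo p (by omega) (by omega)]
  have r4f : (∑ p ∈ Finset.range j, pvI (f p > f j))
      = ∑ p ∈ Finset.range i, pvI (f p > f j) + pvI (f i > f j)
        + ∑ p ∈ Finset.Ico (i+1) j, pvI (f p > f j) :=
    pvSplit3 (fun p => pvI (f p > f j)) hij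
  -- assemble
  unfold pvS pvDelta
  rw [pvSplit5 (fun q => ∑ p ∈ Finset.range q, pvI (F p > F q)) hij hjn,
      pvSplit5 (fun q => ∑ p ∈ Finset.range q, pvI (f p > f q)) hij hjn,
      Finset.sum_congr rfl r1, Finset.sum_congr rfl r5, Finset.sum_congr rfl r3,
      r2, r4F, r4f, Finset.sum_add_distrib]
  simp only [Finset.sum_sub_distrib, Finset.sum_add_distrib]
  ring


-- A's count_inversions computes pvS of the getD function
lemma pvCountInv_eq (a : List Int) :
    pvCountInv a = pvS (fun p => a.getD p 0) a.length := by
  unfold pvCountInv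

  rw [PySem.List.foldl_congr_mem _ _ (fun acc i =>
      acc + ∑ k ∈ Finset.Ico (i+1) a.length, pvI (a.getD i 0 > a.getD k 0)) _
      (fun acc i hi => by
        rw [PySem.List.foldl_ite_add_one]
        congr 1
        rw [← PySem.List.sum_map_ite_one_zero, pvListSumRange',
          show i+1 + (a.length - (i+1)) = a.length by
            rw [List.mem_range] at hi; omega]
        exact Finset.sum_congr rfl fun k _ => by simp [pvI]),
    PySem.List.foldl_add, List.range_eq_range', pvListSumRange']
  simp only [Nat.zero_add, zero_add, Finset.range_eq_Ico]
  rw [Finset.sum_Ico_Ico_comm']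
  simp only [pvS, Finset.range_eq_Ico]

-- getD view of the double set: it is exactly the swapped function
lemma pvGetD_swap (a : List Int) {i j : ℕ} (hij : i < j) (hj : j < a.length) :
    (fun p => ((a.set i (a.getD j 0)).set j (a.getD i 0)).getD p 0)
      = pvSwapF (fun p => a.getD p 0) i j := by
  funext p
  have hi : i < a.length := by omega
  simp only [pvSwapF, List.getD_eq_getElem?_getD, List.getElem?_set, List.length_set]
  by_cases hpj : p = j
  · subst hpj
    simp [hj, hi, (show ¬ p = i by omega), (show ¬ i = p by omega)]
  · by_cases hpi : p = i
    · subst hpi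
      simp [hj, hi, (show ¬ j = p by omega), (show ¬ p = j by omega)]
    · simp [(show ¬ j = p by omega), (show ¬ i = p by omega), hpi, hpj]

-- B's base loop computes pvS as well
lemma pvBase_eq (arr : List Int) :
    (List.range arr.length).foldl (fun acc j =>
      (List.range j).foldl (fun acc i =>
        if arr.getD i 0 > arr.getD j 0 then acc + 1 else acc) acc) 0
    = pvS (fun p => arr.getD p 0) arr.length := by
  rw [PySem.List.foldl_congr_mem _ _ (fun acc j =>
      acc + ∑ p ∈ Finset.range j, pvI (arr.getD p 0 > arr.getD j 0)) _
      (fun acc j _ => by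
        rw [PySem.List.foldl_ite_add_one]
        congr 1
        rw [← PySem.List.sum_map_ite_one_zero, List.range_eq_range', pvListSumRange']
        simp only [Nat.zero_add, zero_add, Finset.range_eq_Ico]
        exact Finset.sum_congr rfl fun k _ => by simp [pvI]),
    PySem.List.foldl_add, List.range_eq_range', pvListSumRange']
  simp only [Nat.zero_add, zero_add]
  simp only [pvS, Finset.range_eq_Ico]

-- B's inner delta loop computes pvDelta
lemma pvDeltaLoop_eq (arr : List Int) {i j : ℕ} (hij : i < j) :
    (List.range' (i+1) (j - (i+1))).foldl (fun d k =>
        d + ((if arr.getD j 0 > arr.getD k 0 then (1:Int) else 0)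
              - (if arr.getD i 0 > arr.getD k 0 then (1:Int) else 0))
          + ((if arr.getD k 0 > arr.getD i 0 then (1:Int) else 0)
              - (if arr.getD k 0 > arr.getD j 0 then (1:Int) else 0)))
      ((if arr.getD j 0 > arr.getD i 0 then (1:Int) else 0)
        - (if arr.getD i 0 > arr.getD j 0 then (1:Int) else 0))
    = pvDelta (fun p => arr.getD p 0) i j := by
  rw [PySem.List.foldl_congr_mem _ _ (fun d k =>
      d + (((if arr.getD j 0 > arr.getD k 0 then (1:Int) else 0)
              - (if arr.getD i 0 > arr.getD k 0 then (1:Int) else 0))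
          + ((if arr.getD k 0 > arr.getD i 0 then (1:Int) else 0)
              - (if arr.getD k 0 > arr.getD j 0 then (1:Int) else 0)))) _
      (fun d k _ => by ring),
    PySem.List.foldl_add, pvListSumRange']
  rw [show i+1 + (j - (i+1)) = j by omega]
  simp [pvDelta, pvI]

-- ===== VERDICT (by name: the statement is the Claim_ definition above) =====
theorem min_inversions_one_swap_spec : Claim_equal_min_inversions_one_swap := by
  intro arr _
  unfold Spec_min_inversions_one_swap min_inversions_one_swap min_inversions_one_swap_alt
  dsimp only
  rw [pvBase_eq, pvCountInv_eq]
  refine PySem.List.foldl_congr_mem _ _ _ _ (fun acc i hi => ?_)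
  refine PySem.List.foldl_congr_mem _ _ _ _ (fun acc2 j hj => ?_)
  rw [List.mem_range] at hi
  rw [List.mem_range'] at hj
  obtain ⟨hij', hjlt⟩ := hj
  have hij : i < j := by omega
  have hjn : j < arr.length := by omega
  rw [pvDeltaLoop_eq arr hij, pvCountInv_eq]
  have hlen : ((arr.set i (arr.getD j 0)).set j (arr.getD i 0)).length = arr.length := by simp
  rw [hlen, pvGetD_swap arr hij hjn, pvS_swap _ hij hjn]
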